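-- pv_equiv track=rewrite | github.com/JHoooooon/getting_start_python_codingtest | cow_baseball/main.py | get_bisect_satisfied_cow_locs
-- ===== SOURCE A (Python) =====
-- from bisect import bisect_left, bisect_right
--
-- def get_bisect_satisfied_cow_locs(cow_locs: list[int]) -> int:
--     """
--     이진탐색
--
--     어떠한 값이 주어지면, 배열을 반으로 나누어
--     A 집합과 B 집합으로 나눈다
--     해당 값이 A 집합의 가장 큰수보다 작으면, A 집합을
--     해당 값이 B 집합의 가장 작은수보다 크면, B 집합을 선택한다
--     선택된 집합을 다시 나누어 똑같은 로직을 반복하면,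
--     해당하는 값을 찾을수 있다
--
--     선형탐색처럼 일일히 모든 값을 비교하는 방법이 아니다
--
--     [1, 2, 3, 4, 5, 6] 라는 집합이 주어지고, 5 값을 찾는다고 하자
--     선형탐색은 1 ~ 5 까지 검색하므로, 5 - 1 = 4 이다
--     총 4번의 순회가 이루어진다
--
--     반면 이진탐색은 다음과 같다
--     6 / 2 = 3 이므로, 3 - 1 인덱스 값과 5 값을 비교한다
--     인덱스 2 는 3 이므로 5 보다 작다
--     그럼 3 인덱스 부터 시작한다
--     3 / 2 = int(1) 이므로, 3 + 1 값을 5 값과 비교한다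
--     인덱스 4 는 5 이므로 5 값이다
--
--     총 2번만에 5 값을 찾는다
--
--     선형탐색은 4번, 이진탐색은 2번이므로, 이진탐색이 훨씬 효율적인것을
--     볼수 있다
--
--     Args:
--         cow_locs (list[int]): 소의 위치 배열
--
--     Returns:
--         int: 투구거리에 만족하는 소의 위치 개수
--     """
--
--     #   위치를 정렬한다
--     sorted_cow_locs = sorted(cow_locs, key=int)
--     cow_locs_len = len(cow_locs)
--
--     # total 값
--     total = 0
--
--     # location 계산
--     for i in range(cow_locs_len):
--         #   i + 1 한 값부터 순회
--         for j in range(i + 1, cow_locs_len):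
--             #   j 인덱스 값에서 i 인덱스 값의 차는 첫번째 구간 간격
--             difference_loc = sorted_cow_locs[j] - sorted_cow_locs[i]
--             #   두번째 소 위치 + 첫번째 구간간격 =  두번째 구간간격의 최소간격
--             low = sorted_cow_locs[j] + difference_loc
--             #   두번째 소 위치 + 두번째 구간간격 * 2 =  두번째 구간간격의 최고간격
--             high = sorted_cow_locs[j] + difference_loc * 2
--
--             #   이진검색을 통해 low 와 값이 같거나, low 가 없다면 low 보다 큰 첫번째 인덱스를 반환한다
--             left = bisect_left(sorted_cow_locs, low)
--             #   이진검색을 통해 high 와 값이 같다면, 해당 인덱스 + 1 한 값을, high 값이 없다면 len 값을 반환한다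
--             right = bisect_right(sorted_cow_locs, high)
--
--             #   right - left = left 값, 중간 값, right 값을 포함하는 개수
--             total = total + right - left
--
--     #   모든 값을 합산한 값
--     return total
-- ===== SOURCE B (Python) =====
-- def get_bisect_satisfied_cow_locs(cow_locs: list[int]) -> int:
--     # Two-pointer version: low/high grow with j, so the boundary indices only
--     # ever move right; advance them incrementally instead of bisecting.
--     s = sorted(cow_locs)
--     n = len(s)
--     total = 0
--     for i in range(n):
--         left = 0
--         right = 0
--         for j in range(i + 1, n):
--             difference_loc = s[j] - s[i]
--             low = s[j] + difference_loc
--             high = s[j] + difference_loc * 2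
--             while left < n and s[left] < low:
--                 left += 1
--             while right < n and s[right] <= high:
--                 right += 1
--             total += right - left
--     return total
-- ===== Notes on version B (the rewrite author's own statement) =====
-- stated objective: faster
-- what changed: replaces the per-pair binary searches (bisect_left/bisect_right) by two pointers that slide monotonically across the inner loop, since low and high only grow with j
import Mathlib
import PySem

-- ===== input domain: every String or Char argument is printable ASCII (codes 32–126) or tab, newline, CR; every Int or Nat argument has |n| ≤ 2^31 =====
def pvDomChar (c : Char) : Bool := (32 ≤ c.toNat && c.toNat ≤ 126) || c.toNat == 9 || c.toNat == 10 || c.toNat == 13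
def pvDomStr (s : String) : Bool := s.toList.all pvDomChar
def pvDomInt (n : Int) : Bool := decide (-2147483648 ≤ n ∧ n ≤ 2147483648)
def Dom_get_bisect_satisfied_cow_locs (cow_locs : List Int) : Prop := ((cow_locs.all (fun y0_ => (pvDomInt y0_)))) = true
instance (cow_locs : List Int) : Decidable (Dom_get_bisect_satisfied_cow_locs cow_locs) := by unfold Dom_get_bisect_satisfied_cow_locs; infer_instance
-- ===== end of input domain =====

-- B replaces A's per-pair binary searches by two pointers that only move right
-- across the inner loop (low/high grow with j): objective = faster.

-- ===== PORT A =====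
def get_bisect_satisfied_cow_locs (cow_locs : List Int) : Int :=
  let sorted_cow_locs := PySem.List.sorted cow_locs (fun x => x) false
  let cow_locs_len := cow_locs.length
  (PySem.List.pyRange 0 (cow_locs_len : Int)).foldl (fun total i =>
    (PySem.List.pyRange (i + 1) (cow_locs_len : Int)).foldl (fun total j =>
      let difference_loc := PySem.List.pyGetD sorted_cow_locs j 0 - PySem.List.pyGetD sorted_cow_locs i 0
      let low := PySem.List.pyGetD sorted_cow_locs j 0 + difference_loc
      let high := PySem.List.pyGetD sorted_cow_locs j 0 + difference_loc * 2
      let left := PySem.List.bisectLeft sorted_cow_locs low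
      let right := PySem.List.bisectRight sorted_cow_locs high
      total + (right : Int) - (left : Int)) total) 0

-- ===== PORT B =====
-- the 'while left < n and s[left] < low: left += 1' loops of Source B (pointer is a
-- nonnegative int starting at 0, so Nat); exact: guard and index mirror Python
def pvAdvance (s : List Int) (p : Int → Bool) (l : Nat) : Nat :=
  if h : l < s.length ∧ p (s.getD l 0) = true then pvAdvance s p (l + 1) else l
termination_by s.length - l
decreasing_by omega

def get_bisect_satisfied_cow_locs_alt (cow_locs : List Int) : Int :=
  let s := PySem.List.sorted cow_locs (fun x => x) false
  let n := s.length
  ((PySem.List.pyRange 0 (n : Int)).foldl (fun total i =>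
    ((PySem.List.pyRange (i + 1) (n : Int)).foldl (fun (st : Int × Nat × Nat) j =>
      let difference_loc := PySem.List.pyGetD s j 0 - PySem.List.pyGetD s i 0
      let low := PySem.List.pyGetD s j 0 + difference_loc
      let high := PySem.List.pyGetD s j 0 + difference_loc * 2
      let left := pvAdvance s (fun v => v < low) st.2.1
      let right := pvAdvance s (fun v => v ≤ high) st.2.2
      (st.1 + ((right : Int) - (left : Int)), left, right)) (total, 0, 0)).1) 0)

-- ===== PRECONDITION & SPEC =====
def Spec_get_bisect_satisfied_cow_locs (cow_locs : List Int) (out : Int) : Prop := out = get_bisect_satisfied_cow_locs_alt cow_locs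
instance (cow_locs : List Int) (out : Int) : Decidable (Spec_get_bisect_satisfied_cow_locs cow_locs out) := by unfold Spec_get_bisect_satisfied_cow_locs; infer_instance

-- ===== CLAIM (what is proved, stated in full; the proofs are below) =====
def Claim_equal_get_bisect_satisfied_cow_locs : Prop := ∀ (cow_locs : List Int), Dom_get_bisect_satisfied_cow_locs cow_locs → Spec_get_bisect_satisfied_cow_locs cow_locs (get_bisect_satisfied_cow_locs cow_locs)

-- ===== LEMMAS AND PROOFS =====

-- on a sorted list, a downward-closed predicate holds exactly on the first countP positions
theorem pv_char (s : List Int) (p : Int → Bool) (hs : s.Pairwise (· ≤ ·))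
    (hdc : ∀ a b : Int, a ≤ b → p b = true → p a = true) :
    ∀ k (hk : k < s.length), (p s[k] = true ↔ k < s.countP p) := by
  induction s with
  | nil => intro k hk; simp at hk
  | cons a t ih =>
    rw [List.pairwise_cons] at hs
    obtain ⟨hat, hpt⟩ := hs
    by_cases hpa : p a = true
    · intro k hk
      cases k with
      | zero => simp [hpa]
      | succ k =>
        have hk' : k < t.length := by simpa using hk
        simp only [List.getElem_cons_succ]
        rw [ih hpt k hk']
        simp [hpa]
    · have ht0 : t.countP p = 0 := by
        rw [List.countP_eq_zero]
        intro b hb hpb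
        exact hpa (hdc a b (hat b hb) hpb)
      intro k hk
      have hc0 : (a :: t).countP p = 0 := by
        simp [hpa, ht0]
      rw [hc0]
      cases k with
      | zero => simpa using hpa
      | succ k =>
        have hk' : k < t.length := by simpa using hk
        simp only [List.getElem_cons_succ]
        constructor
        · intro hpk
          exact absurd (hdc a t[k] (hat t[k] (List.getElem_mem hk')) hpk) hpa
        · omega

theorem pv_bisectLeft_eq (s : List Int) (x : Int) (hs : s.Pairwise (· ≤ ·)) :
    PySem.List.bisectLeft s x = s.countP (fun v => decide (v < x)) := by
  obtain ⟨h1, h2, h3⟩ := PySem.List.bisectLeft_spec s x hs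
  have hchar := pv_char s (fun v => decide (v < x)) hs (by intro a b hab h; simp at *; omega)
  have hcl : s.countP (fun v => decide (v < x)) ≤ s.length := List.countP_le_length
  set bl := PySem.List.bisectLeft s x
  set c := s.countP (fun v => decide (v < x))
  rcases lt_trichotomy bl c with h | h | h
  · have hbl : bl < s.length := by omega
    have := (hchar bl hbl).2 (by omega)
    have := h3 bl hbl (le_refl _)
    simp at *; omega
  · exact h
  · have hcs : c < s.length := by omega
    have := h2 c hcs h
    have := (hchar c hcs).1 (by simpa using this)
    omega

theorem pv_bisectRight_eq (s : List Int) (x : Int) (hs : s.Pairwise (· ≤ ·)) :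
    PySem.List.bisectRight s x = s.countP (fun v => decide (v ≤ x)) := by
  obtain ⟨h1, h2, h3⟩ := PySem.List.bisectRight_spec s x hs
  have hchar := pv_char s (fun v => decide (v ≤ x)) hs (by intro a b hab h; simp at *; omega)
  have hcl : s.countP (fun v => decide (v ≤ x)) ≤ s.length := List.countP_le_length
  set br := PySem.List.bisectRight s x
  set c := s.countP (fun v => decide (v ≤ x))
  rcases lt_trichotomy br c with h | h | h
  · have hbr : br < s.length := by omega
    have := (hchar br hbr).2 (by omega)
    have := h3 br hbr (le_refl _)
    simp at *; omega
  · exact h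
  · have hcs : c < s.length := by omega
    have := h2 c hcs h
    have := (hchar c hcs).1 (by simpa using this)
    omega

theorem pv_advance_stop (s : List Int) (p : Int → Bool) (hs : s.Pairwise (· ≤ ·))
    (hdc : ∀ a b : Int, a ≤ b → p b = true → p a = true) :
    pvAdvance s p (s.countP p) = s.countP p := by
  rw [pvAdvance]
  split
  · next h =>
    obtain ⟨h1, h2⟩ := h
    rw [List.getD_eq_getElem _ _ h1] at h2
    have := (pv_char s p hs hdc _ h1).1 h2
    omega
  · rfl

theorem pv_advance_eq (s : List Int) (p : Int → Bool) (hs : s.Pairwise (· ≤ ·))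
    (hdc : ∀ a b : Int, a ≤ b → p b = true → p a = true) :
    ∀ l, l ≤ s.countP p → pvAdvance s p l = s.countP p := by
  have H : ∀ m l, s.countP p - l ≤ m → l ≤ s.countP p → pvAdvance s p l = s.countP p := by
    intro m
    induction m with
    | zero =>
      intro l h1 h2
      have : l = s.countP p := by omega
      rw [this]; exact pv_advance_stop s p hs hdc
    | succ m ih =>
      intro l h1 h2
      by_cases hl : l = s.countP p
      · rw [hl]; exact pv_advance_stop s p hs hdc
      · have hlc : l < s.countP p := by omega
        have hllen : l < s.length := by
          have := List.countP_le_length (p := p) (l := s); omega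
        have hpl : p s[l] = true := (pv_char s p hs hdc l hllen).2 hlc
        rw [pvAdvance]
        rw [dif_pos ⟨hllen, by rw [List.getD_eq_getElem _ _ hllen]; exact hpl⟩]
        exact ih (l + 1) (by omega) (by omega)
  intro l hl; exact H (s.countP p) l (by omega) hl

theorem pv_getD_mono (s : List Int) (hs : s.Pairwise (· ≤ ·)) {j j' : Int}
    (h0 : 0 ≤ j) (hjj : j ≤ j') (hlt : j' < (s.length : Int)) :
    PySem.List.pyGetD s j 0 ≤ PySem.List.pyGetD s j' 0 := by
  rw [PySem.List.pyGetD_eq_getElem s 0 h0 (by omega),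
      PySem.List.pyGetD_eq_getElem s 0 (by omega) hlt]
  rcases Nat.lt_or_ge j.toNat j'.toNat with h | h
  · exact List.pairwise_iff_getElem.mp hs _ _ (by omega) (by omega) h
  · have hidx : j.toNat = j'.toNat := by omega
    simp [hidx]

-- the inner loops of the two ports agree, given the pointer invariant
theorem pv_inner (s : List Int) (hs : s.Pairwise (· ≤ ·)) (si : Int) :
    ∀ (js : List Int), js.Pairwise (· ≤ ·) →
      (∀ j ∈ js, 0 ≤ j ∧ j < (s.length : Int)) →
      ∀ (t : Int) (L R : Nat),
        (∀ j ∈ js,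
          L ≤ s.countP (fun v => decide (v < PySem.List.pyGetD s j 0 + (PySem.List.pyGetD s j 0 - si))) ∧
          R ≤ s.countP (fun v => decide (v ≤ PySem.List.pyGetD s j 0 + (PySem.List.pyGetD s j 0 - si) * 2))) →
        (js.foldl (fun (st : Int × Nat × Nat) j =>
            (st.1 + ((pvAdvance s (fun v => decide (v ≤ PySem.List.pyGetD s j 0 + (PySem.List.pyGetD s j 0 - si) * 2)) st.2.2 : Int)
                   - (pvAdvance s (fun v => decide (v < PySem.List.pyGetD s j 0 + (PySem.List.pyGetD s j 0 - si))) st.2.1 : Int)),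
             pvAdvance s (fun v => decide (v < PySem.List.pyGetD s j 0 + (PySem.List.pyGetD s j 0 - si))) st.2.1,
             pvAdvance s (fun v => decide (v ≤ PySem.List.pyGetD s j 0 + (PySem.List.pyGetD s j 0 - si) * 2)) st.2.2)) (t, L, R)).1
        = js.foldl (fun total j =>
            total + (PySem.List.bisectRight s (PySem.List.pyGetD s j 0 + (PySem.List.pyGetD s j 0 - si) * 2) : Int)
                  - (PySem.List.bisectLeft s (PySem.List.pyGetD s j 0 + (PySem.List.pyGetD s j 0 - si)) : Int)) t := by
  intro js
  induction js with
  | nil => intro _ _ t L R _; rfl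
  | cons j rest ih =>
    intro hpw hbnd t L R hinv
    rw [List.pairwise_cons] at hpw
    obtain ⟨hjrest, hpw'⟩ := hpw
    have hj := hbnd j (by simp)
    have hdcL : ∀ a b : Int, a ≤ b →
        (fun v => decide (v < PySem.List.pyGetD s j 0 + (PySem.List.pyGetD s j 0 - si))) b = true →
        (fun v => decide (v < PySem.List.pyGetD s j 0 + (PySem.List.pyGetD s j 0 - si))) a = true := by
      intro a b hab h; simp at *; omega
    have hdcR : ∀ a b : Int, a ≤ b →
        (fun v => decide (v ≤ PySem.List.pyGetD s j 0 + (PySem.List.pyGetD s j 0 - si) * 2)) b = true →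
        (fun v => decide (v ≤ PySem.List.pyGetD s j 0 + (PySem.List.pyGetD s j 0 - si) * 2)) a = true := by
      intro a b hab h; simp at *; omega
    have hL := pv_advance_eq s _ hs hdcL L (hinv j (by simp)).1
    have hR := pv_advance_eq s _ hs hdcR R (hinv j (by simp)).2
    simp only [List.foldl_cons]
    rw [hL, hR, pv_bisectLeft_eq s _ hs, pv_bisectRight_eq s _ hs]
    have harith : ∀ (cL cR : Nat),
        t + ((cR : Int) - (cL : Int)) = t + (cR : Int) - (cL : Int) := by
      intro cL cR; ring
    rw [harith]
    apply ih hpw' (fun j' hj' => hbnd j' (by simp [hj']))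
    intro j' hj'
    have hj'b := hbnd j' (by simp [hj'])
    have hmono : PySem.List.pyGetD s j 0 ≤ PySem.List.pyGetD s j' 0 :=
      pv_getD_mono s hs hj.1 (hjrest j' hj') hj'b.2
    constructor
    · exact List.countP_mono_left (by intro x _ h; simp at *; omega)
    · exact List.countP_mono_left (by intro x _ h; simp at *; omega)

-- ===== VERDICT (by name: the statement is the Claim_ definition above) =====
theorem get_bisect_satisfied_cow_locs_spec : Claim_equal_get_bisect_satisfied_cow_locs := by
  intro cow_locs _
  unfold Spec_get_bisect_satisfied_cow_locs
  unfold get_bisect_satisfied_cow_locs get_bisect_satisfied_cow_locs_alt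
  simp only []
  set s := PySem.List.sorted cow_locs (fun x => x) false with hsdef
  have hs : s.Pairwise (· ≤ ·) := PySem.List.sorted_pairwise cow_locs (fun x => x)
  have hlen : s.length = cow_locs.length := PySem.List.length_sorted cow_locs (fun x => x) false
  rw [← hlen]
  apply Eq.symm
  apply PySem.List.foldl_congr_mem
  intro total i hi
  have hi0 : 0 ≤ i := (PySem.List.mem_pyRange_one.mp hi).1
  exact pv_inner s hs (PySem.List.pyGetD s i 0)
    (PySem.List.pyRange (i + 1) (s.length : Int))
    ((PySem.List.pairwise_lt_pyRange_one _ _).imp le_of_lt)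
    (fun j hj => by
      have := PySem.List.mem_pyRange_one.mp hj; exact ⟨by omega, this.2⟩)
    total 0 0
    (fun j _ => ⟨Nat.zero_le _, Nat.zero_le _⟩)
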